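-- pv_equiv track=rewrite | github.com/bbusenius/Projects | Principles_of_Computing/Word_Wrangler.py | gen_all_strings
-- ===== SOURCE A (Python) =====
-- def gen_all_strings(word):
--     """
--     Generate all strings that can be composed from the letters in word
--     in any order.
--
--     Returns a list of all strings that can be formed from the letters
--     in word.
--
--     This function should be recursive.
--     """
--     # Base case
--     if word == '':
--         return ['']
--     # Recursive case
--     else:
--         # Split the first letter and the rest of
--         # the word into seperate strings.
--         first = word[0]
--         rest = word[1:]
--         # Recurstion.
--         rest_strings = gen_all_strings(rest)
--         temp = []
--         for string in rest_strings:
--             # Len + 1 because we need to append the first variable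
--             # to the end of the last string (I think)
--             for indx in range(len(string) + 1):
--                 # Make new strings by inserting the first character
--                 # at all positions in the original (rest) string and
--                 # append the new strings to the temp list.
--                 new_string = string[:indx] + first + string[indx:]
--                 temp.append(new_string)
--         # Concatonate rest_strings and the temp list
--         rest_strings += temp
--         return rest_strings
-- ===== SOURCE B (Python) =====
-- def gen_all_strings(word):
--     """Iterative version: unrolls the recursion from the last character inward,
--     keeping an accumulator of all strings built so far."""
--     result = ['']
--     for first in reversed(word):
--         temp = []
--         for string in result:
--             for indx in range(len(string) + 1):
--                 temp.append(string[:indx] + first + string[indx:])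
--         result = result + temp
--     return result
-- ===== Notes on version B (the rewrite author's own statement) =====
-- stated objective: alternative
-- what changed: Replaced the linear recursion on the word with an explicit iterative accumulator loop over reversed(word), building the result front-to-back instead of unwinding a call stack.
import Mathlib
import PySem

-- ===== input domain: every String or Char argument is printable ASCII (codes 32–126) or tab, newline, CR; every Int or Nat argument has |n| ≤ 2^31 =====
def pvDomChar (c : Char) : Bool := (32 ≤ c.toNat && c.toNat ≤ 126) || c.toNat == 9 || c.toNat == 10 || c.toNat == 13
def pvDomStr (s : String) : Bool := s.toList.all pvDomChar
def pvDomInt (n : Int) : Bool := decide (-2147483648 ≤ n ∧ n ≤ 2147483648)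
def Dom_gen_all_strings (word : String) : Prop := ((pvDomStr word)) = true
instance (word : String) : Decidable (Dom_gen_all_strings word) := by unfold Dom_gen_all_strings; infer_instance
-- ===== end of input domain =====

-- B replaces A's linear recursion by an iterative accumulator loop over reversed(word); objective: alternative decomposition (no speed claim).
-- Strings are ported through List Char (PySem.Chars style); slices string[:i]/string[i:] with 0 ≤ i ≤ len are exactly take/drop.
-- The Python 'for … append' emission loops are ported as map/flatMap (same elements in the same order, appended once).

-- ===== PORT A =====
-- recursive case: first = word[0], rest = word[1:], insert first at every position of every rest string
def genAllStringsA : List Char → List (List Char)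
  | [] => [[]]
  | first :: rest =>
    let rest_strings := genAllStringsA rest
    let temp := rest_strings.flatMap (fun string =>
      (List.range (string.length + 1)).map
        (fun indx => string.take indx ++ [first] ++ string.drop indx))
    rest_strings ++ temp

def gen_all_strings (word : String) : List String :=
  (genAllStringsA word.toList).map String.mk

-- ===== PORT B =====
-- iterative: result = [''], then for first in reversed(word): result = result + temp
def gen_all_strings_alt (word : String) : List String :=
  (word.toList.reverse.foldl
    (fun result first =>
      result ++ result.flatMap (fun string =>
        (List.range (string.length + 1)).map
          (fun indx => string.take indx ++ [first] ++ string.drop indx)))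
    [[]]).map String.mk

-- ===== PRECONDITION & SPEC =====
def Spec_gen_all_strings (word : String) (out : List String) : Prop := out = gen_all_strings_alt word
instance (word : String) (out : List String) : Decidable (Spec_gen_all_strings word out) := by unfold Spec_gen_all_strings; infer_instance

-- ===== CLAIM (what is proved, stated in full; the proofs are below) =====
def Claim_equal_gen_all_strings : Prop := ∀ (word : String), Dom_gen_all_strings word → Spec_gen_all_strings word (gen_all_strings word)

-- ===== LEMMAS AND PROOFS =====
def pvStep (result : List (List Char)) (first : Char) : List (List Char) :=
  result ++ result.flatMap (fun string =>
    (List.range (string.length + 1)).map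
      (fun indx => string.take indx ++ [first] ++ string.drop indx))

theorem genAllStringsA_eq_foldl (l : List Char) :
    genAllStringsA l = l.reverse.foldl pvStep [[]] := by
  induction l with
  | nil => rfl
  | cons c rest ih =>
    simp only [genAllStringsA, List.reverse_cons, List.foldl_append, List.foldl_cons,
      List.foldl_nil, ← ih, pvStep]

-- ===== VERDICT (by name: the statement is the Claim_ definition above) =====
theorem gen_all_strings_spec : Claim_equal_gen_all_strings := by
  intro word _
  unfold Spec_gen_all_strings gen_all_strings gen_all_strings_alt
  rw [genAllStringsA_eq_foldl]
  rfl
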